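-- pv_equiv track=rewrite | github.com/JakubGasparin/Packet-frame-analyzer | main.py | _format_frame
-- ===== SOURCE A (Python) =====
-- def _format_frame(frame):
--     new_frame = ''
--     counter = 0
--     for char in frame:
--         if counter == 1:
--             new_frame += char + ' ' * 1
--             counter = 0
--         else:
--             new_frame += char
--             counter += 1
--
--     counter = 0
--     new_frame_with_spaces = ''
--     for char in new_frame:
--         if counter == 47:
--             new_frame_with_spaces += char + '\n' * 1
--             counter = 0
--         else:
--             new_frame_with_spaces += char
--             counter += 1
--     new_frame_with_spaces = new_frame_with_spaces.upper()
--     return new_frame_with_spaces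
-- ===== SOURCE B (Python) =====
-- def _format_frame(frame):
--     # Slice-based chunking instead of char-by-char counter loops.
--     spaced = []
--     i = 0
--     while i < len(frame):
--         chunk = frame[i:i + 2]
--         spaced.append(chunk + (' ' if len(chunk) == 2 else ''))
--         i += 2
--     s = ''.join(spaced)
--     out = []
--     i = 0
--     while i < len(s):
--         chunk = s[i:i + 48]
--         out.append(chunk + ('\n' if len(chunk) == 48 else ''))
--         i += 48
--     return ''.join(out).upper()
-- ===== Notes on version B (the rewrite author's own statement) =====
-- stated objective: simpler
-- what changed: Replaces A's two char-by-char counter loops (counter==1 / counter==47 with per-character string concatenation) by slice-based chunking: cut the string into 2-char then 48-char slices and join them with the separator appended after each full slice.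
import Mathlib
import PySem

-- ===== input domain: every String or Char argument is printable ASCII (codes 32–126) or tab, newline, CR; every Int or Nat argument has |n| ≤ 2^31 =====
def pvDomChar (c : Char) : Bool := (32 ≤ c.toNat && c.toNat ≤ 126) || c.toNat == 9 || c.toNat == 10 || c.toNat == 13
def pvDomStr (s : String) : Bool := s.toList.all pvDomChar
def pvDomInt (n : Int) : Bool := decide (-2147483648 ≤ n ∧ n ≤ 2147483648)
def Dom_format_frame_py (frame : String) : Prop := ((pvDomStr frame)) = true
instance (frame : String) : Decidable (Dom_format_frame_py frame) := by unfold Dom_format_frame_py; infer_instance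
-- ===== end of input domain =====

-- B replaces A's two char-by-char counter loops by slice-based chunking (2 then 48); objective: simpler decomposition, same cost.


-- ===== PORT A =====
def format_frame_py (frame : String) : String :=
  let new_frame := (frame.toList.foldl
    (fun (st : List Char × Nat) c =>
      if st.2 = 1 then (st.1 ++ [c, ' '], 0) else (st.1 ++ [c], st.2 + 1))
    ([], 0)).1
  let new_frame_with_spaces := (new_frame.foldl
    (fun (st : List Char × Nat) c =>
      if st.2 = 47 then (st.1 ++ [c, '\n'], 0) else (st.1 ++ [c], st.2 + 1))
    ([], 0)).1
  String.ofList (PySem.Chars.upper new_frame_with_spaces)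

-- ===== PORT B =====
-- B's while loop 'chunk = s[i:i+m+1]; append chunk (+ sep if full); i += m+1' as
-- recursion on the remaining suffix (chunk size m+1).
def chunkJoin (m : Nat) (sep : Char) (xs : List Char) : List Char :=
  if h : xs = [] then []
  else (xs.take (m + 1) ++ (if m + 1 ≤ xs.length then [sep] else []))
        ++ chunkJoin m sep (xs.drop (m + 1))
termination_by xs.length
decreasing_by
  have := List.length_pos_of_ne_nil h
  simp [List.length_drop]
  omega

def format_frame_py_alt (frame : String) : String :=
  String.ofList (PySem.Chars.upper (chunkJoin 47 '\n' (chunkJoin 1 ' ' frame.toList)))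

-- ===== PRECONDITION & SPEC =====
def Spec_format_frame_py (frame : String) (out : String) : Prop := out = format_frame_py_alt frame
instance (frame : String) (out : String) : Decidable (Spec_format_frame_py frame out) := by unfold Spec_format_frame_py; infer_instance

-- ===== CLAIM (what is proved, stated in full; the proofs are below) =====
def Claim_equal_format_frame_py : Prop := ∀ (frame : String), Dom_format_frame_py frame → Spec_format_frame_py frame (format_frame_py frame)

-- ===== LEMMAS AND PROOFS =====

-- A's counter loop, accumulator factored out.
def cloop (m : Nat) (sep : Char) : List Char → Nat → List Char
  | [], _ => []
  | x :: xs, c => if c = m then x :: sep :: cloop m sep xs 0 else x :: cloop m sep xs (c + 1)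

theorem foldl_cloop (m : Nat) (sep : Char) (xs : List Char) (acc : List Char) (c : Nat) :
    (xs.foldl (fun (st : List Char × Nat) ch =>
        if st.2 = m then (st.1 ++ [ch, sep], 0) else (st.1 ++ [ch], st.2 + 1)) (acc, c)).1
      = acc ++ cloop m sep xs c := by
  induction xs generalizing acc c with
  | nil => simp [cloop]
  | cons x xs ih =>
    by_cases h : c = m <;> simp [cloop, h, List.foldl, ih]

theorem chunkJoin_eq (m : Nat) (sep : Char) (xs : List Char) :
    chunkJoin m sep xs
      = (xs.take (m + 1) ++ (if m + 1 ≤ xs.length then [sep] else []))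
        ++ chunkJoin m sep (xs.drop (m + 1)) := by
  cases h : xs with
  | nil => simp [chunkJoin]
  | cons y ys => rw [chunkJoin]; simp

theorem cloop_chunkJoin (m : Nat) (sep : Char) (xs : List Char) (c : Nat) (hc : c ≤ m) :
    cloop m sep xs c
      = (xs.take (m + 1 - c) ++ (if m + 1 - c ≤ xs.length then [sep] else []))
        ++ chunkJoin m sep (xs.drop (m + 1 - c)) := by
  induction xs generalizing c with
  | nil => simp [cloop, chunkJoin]; omega
  | cons x xs ih =>
    by_cases h : c = m
    · have key : cloop m sep xs 0 = chunkJoin m sep xs := by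
        rw [ih 0 (Nat.zero_le _)]
        simp only [Nat.sub_zero]
        exact (chunkJoin_eq m sep xs).symm
      simp [cloop, h, key]
    · have h2 : m + 1 - c = (m + 1 - (c + 1)) + 1 := by omega
      have h3 : c + 1 ≤ m := by omega
      simp [cloop, h, ih (c + 1) h3, h2]

theorem cloop_eq_chunkJoin (m : Nat) (sep : Char) (xs : List Char) :
    cloop m sep xs 0 = chunkJoin m sep xs := by
  rw [cloop_chunkJoin m sep xs 0 (Nat.zero_le _)]
  simp only [Nat.sub_zero]
  exact (chunkJoin_eq m sep xs).symm

-- ===== VERDICT (by name: the statement is the Claim_ definition above) =====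
theorem format_frame_py_spec : Claim_equal_format_frame_py := by
  intro frame _
  unfold Spec_format_frame_py format_frame_py format_frame_py_alt
  simp only [foldl_cloop, List.nil_append, cloop_eq_chunkJoin]
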